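-- pv_equiv track=rewrite | github.com/MarioLara21/TodasFunciones | PracticasListasParaExamenLeonardoMario.py | agrupar
-- ===== SOURCE A (Python) =====
-- def agrupar(lisEnteros):
--     """
--     Funcionalidad: Retornar una lista donde cada índice contiene el entero respectivo con los mismos dígitos agrupados según aparezcan de izquierda a derecha
--     Entradas: lisEnteros(list),lista de enteros
--     Salidas: salidaV(list), lista donde cada índice contiene el entero respectivo con los mismos dígitos agrupados según aparezcan de izquierda a derecha
--     """
--     salida = []
--     salidaF = ""
--     salidaV = []
--     index = len(list(lisEnteros))
--     cont = 0
--
--     while cont < index :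
--         listaEval = list(str(lisEnteros[cont]))
--
--         for i in listaEval:
--             contador = listaEval.count(i)
--             while i not in salida:
--                 while  contador > 0:
--                     salida.append(i)
--                     salidaF += str(i)
--                     contador -= 1
--         salidaV.append(int(salidaF))
--         salida = []
--         salidaF = ""
--         cont += 1
--
--     return salidaV
-- ===== SOURCE B (Python) =====
-- def agrupar(lisEnteros):
--     salidaV = []
--     for x in lisEnteros:
--         s = str(x)
--         salidaV.append(int(''.join(sorted(s, key=s.index))))
--     return salidaV
-- ===== Notes on version B (the rewrite author's own statement) =====
-- stated objective: simpler
-- what changed: Replaces A's seen-list scan with nested count/emit while-loops per digit by a single stable sort of each number's digit string keyed by first-occurrence index (sorted(s, key=s.index)), which groups equal digits in first-appearance order in one expression.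
import Mathlib
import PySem

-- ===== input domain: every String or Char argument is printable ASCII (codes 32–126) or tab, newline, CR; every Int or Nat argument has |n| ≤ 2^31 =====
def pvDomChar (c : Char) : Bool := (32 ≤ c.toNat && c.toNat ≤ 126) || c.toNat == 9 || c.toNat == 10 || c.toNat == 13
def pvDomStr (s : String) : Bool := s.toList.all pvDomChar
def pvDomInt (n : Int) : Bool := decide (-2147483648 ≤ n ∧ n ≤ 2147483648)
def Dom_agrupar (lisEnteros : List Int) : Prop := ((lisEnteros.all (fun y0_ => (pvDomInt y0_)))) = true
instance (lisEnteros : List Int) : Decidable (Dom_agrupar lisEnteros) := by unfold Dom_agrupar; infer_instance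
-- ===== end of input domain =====

-- B replaces A's seen-list scan with nested count/emit while-loops by a stable sort of each
-- digit string keyed by first-occurrence index; objective: simpler (same asymptotic cost).

-- ===== PORT A =====
-- inner `while contador > 0: salida.append(i); salidaF += str(i); contador -= 1`
-- (salida, salidaF carried as List Char; salidaF is built char by char, exact)
def pvAppendRep : List Char × List Char → Char → Nat → List Char × List Char
  | st, _, 0 => st
  | st, i, Nat.succ k => pvAppendRep (st.1 ++ [i], st.2 ++ [i]) i k

-- body of `for i in listaEval`: `contador = listaEval.count(i); while i not in salida: while contador > 0: …`.
-- i comes from listaEval itself, so contador ≥ 1 and after one pass of the inner while i ∈ salida: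
-- the outer while runs its body at most once, which the `if` transcribes.
def pvStepA (listaEval : List Char) (st : List Char × List Char) (i : Char) : List Char × List Char :=
  if i ∈ st.1 then st else pvAppendRep st i (PySem.List.count listaEval i)

-- `while cont < index: … lisEnteros[cont] … cont += 1` with index = len(lisEnteros):
-- indexing 0,1,…,len-1 in order is walking the list structurally.
def pvAgruparLoop : List Int → List Int → List Int
  | [], salidaV => salidaV
  | x :: rest, salidaV =>
      let listaEval := PySem.Int.toChars x
      let st := listaEval.foldl (pvStepA listaEval) ([], [])
      -- int(salidaF): always parses here (salidaF regroups the digits of str(x)); getD 0 unreachable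
      pvAgruparLoop rest (salidaV ++ [(PySem.Int.ofChars? st.2).getD 0])

def agrupar (lisEnteros : List Int) : List Int := pvAgruparLoop lisEnteros []

-- ===== PORT B =====
-- per element: s = str(x); int(''.join(sorted(s, key=s.index)))  (join of chars = the char list)
def agrupar_alt (lisEnteros : List Int) : List Int :=
  lisEnteros.map (fun x =>
    let s := PySem.Int.toChars x
    -- int(…): always parses (a regrouping of str(x)); getD 0 unreachable
    (PySem.Int.ofChars? (PySem.List.sorted s (fun c => (PySem.List.index? s c).getD 0))).getD 0)

-- ===== PRECONDITION & SPEC =====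
def Spec_agrupar (lisEnteros : List Int) (out : List Int) : Prop := out = agrupar_alt lisEnteros
instance (lisEnteros : List Int) (out : List Int) : Decidable (Spec_agrupar lisEnteros out) := by unfold Spec_agrupar; infer_instance

-- ===== CLAIM (what is proved, stated in full; the proofs are below) =====
def Claim_equal_agrupar : Prop := ∀ (lisEnteros : List Int), Dom_agrupar lisEnteros → Spec_agrupar lisEnteros (agrupar lisEnteros)

-- ===== LEMMAS AND PROOFS =====

-- the part of A's per-string state shared by salida and salidaF (they receive the same appends)
def pvG (s : List Char) : List Char → List Char → List Char
  | [], seen => seen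
  | i :: t, seen =>
      if i ∈ seen then pvG s t seen
      else pvG s t (seen ++ List.replicate (PySem.List.count s i) i)

-- first occurrences of todo not already in seen, in order
def pvD : List Char → List Char → List Char
  | [], _ => []
  | i :: t, seen => if i ∈ seen then pvD t seen else i :: pvD t (i :: seen)

lemma pvAppendRep_spec (i : Char) : ∀ (k : Nat) (a b : List Char),
    pvAppendRep (a, b) i k = (a ++ List.replicate k i, b ++ List.replicate k i) := by
  intro k
  induction k with
  | zero => intro a b; simp [pvAppendRep]
  | succ k ih =>
      intro a b
      simp [pvAppendRep, ih, List.replicate_succ]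

lemma pvFold_eq_pvG (s : List Char) : ∀ (todo acc : List Char),
    todo.foldl (pvStepA s) (acc, acc) = (pvG s todo acc, pvG s todo acc) := by
  intro todo
  induction todo with
  | nil => intro acc; simp [pvG]
  | cons i t ih =>
      intro acc
      by_cases h : i ∈ acc
      · simp [pvStepA, pvG, h, ih]
      · simp only [List.foldl_cons, pvStepA, h, pvG, if_false]
        rw [pvAppendRep_spec, ih]

lemma pvD_congr : ∀ (todo s1 s2 : List Char), (∀ c, c ∈ s1 ↔ c ∈ s2) → pvD todo s1 = pvD todo s2 := by
  intro todo
  induction todo with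
  | nil => intro _ _ _; rfl
  | cons i t ih =>
      intro s1 s2 h
      by_cases h1 : i ∈ s1
      · simp [pvD, h1, (h i).mp h1, ih _ _ h]
      · have h2 : i ∉ s2 := fun hc => h1 ((h i).mpr hc)
        simp only [pvD, h1, h2, if_false]
        rw [ih (i :: s1) (i :: s2) (by intro c; simp [h c])]

lemma pvG_spec (s : List Char) : ∀ (todo seen : List Char), (∀ c ∈ todo, c ∈ s) →
    pvG s todo seen = seen ++ (pvD todo seen).flatMap (fun c => List.replicate (s.count c) c) := by
  intro todo
  induction todo with
  | nil => intro seen _; simp [pvG, pvD]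
  | cons i t ih =>
      intro seen hsub
      have hi : i ∈ s := hsub i (by simp)
      have hk : 0 < s.count i := List.count_pos_iff.mpr hi
      by_cases h : i ∈ seen
      · simp only [pvG, pvD, h, if_true]
        exact ih seen (fun c hc => hsub c (by simp [hc]))
      · simp only [pvG, pvD, h, if_false]
        rw [ih _ (fun c hc => hsub c (by simp [hc]))]
        rw [pvD_congr t (seen ++ List.replicate (PySem.List.count s i) i) (i :: seen)
          (by intro c; simp [PySem.List.count_eq, List.mem_replicate, Nat.pos_iff_ne_zero.mp hk, or_comm, eq_comm])]
        simp [PySem.List.count_eq, List.flatMap_cons, List.append_assoc]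

lemma pvD_mem : ∀ (todo seen : List Char) (c : Char), c ∈ pvD todo seen ↔ c ∈ todo ∧ c ∉ seen := by
  intro todo
  induction todo with
  | nil => intro seen c; simp [pvD]
  | cons i t ih =>
      intro seen c
      by_cases h : i ∈ seen
      · simp only [pvD, h, if_true, ih]
        constructor
        · rintro ⟨hc, hn⟩; exact ⟨by simp [hc], hn⟩
        · rintro ⟨hc, hn⟩
          rcases List.mem_cons.mp hc with rfl | hc
          · exact absurd h hn
          · exact ⟨hc, hn⟩

      · simp only [pvD, h, if_false, List.mem_cons, ih]
        constructor
        · rintro (rfl | ⟨hc, hn⟩)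
          · exact ⟨by simp, h⟩
          · exact ⟨by simp [hc], fun hx => hn (by simp [hx])⟩
        · rintro ⟨rfl | hc, hn⟩
          · exact Or.inl rfl
          · by_cases hci : c = i
            · exact Or.inl hci
            · exact Or.inr ⟨hc, by simp [hci, hn]⟩

lemma pvD_nodup : ∀ (todo seen : List Char), (pvD todo seen).Nodup := by
  intro todo
  induction todo with
  | nil => intro seen; simp [pvD]
  | cons i t ih =>
      intro seen
      by_cases h : i ∈ seen
      · simpa [pvD, h] using ih seen
      · simp only [pvD, h, if_false, List.nodup_cons]
        exact ⟨fun hc => ((pvD_mem t (i :: seen) i).mp hc).2 (by simp), ih _⟩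

lemma pvD_pairwise : ∀ (todo seen : List Char),
    (pvD todo seen).Pairwise (fun a b => todo.idxOf a < todo.idxOf b) := by
  intro todo
  induction todo with
  | nil => intro seen; simp [pvD]
  | cons i t ih =>
      intro seen
      by_cases h : i ∈ seen
      · simp only [pvD, h, if_true]
        refine ((ih seen).imp_of_mem ?_)
        intro a b ha hb hab
        have hna : a ≠ i := fun hc => ((pvD_mem t seen a).mp ha).2 (hc ▸ h)
        have hnb : b ≠ i := fun hc => ((pvD_mem t seen b).mp hb).2 (hc ▸ h)
        simpa [List.idxOf_cons, Ne.symm hna, Ne.symm hnb] using Nat.succ_lt_succ hab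
      · simp only [pvD, h, if_false]
        refine List.pairwise_cons.mpr ⟨?_, ?_⟩
        · intro b hb
          have hnb : b ≠ i := fun hc => ((pvD_mem t (i :: seen) b).mp hb).2 (by simp [hc])
          simp [Ne.symm hnb]
        · refine ((ih (i :: seen)).imp_of_mem ?_)
          intro a b ha hb hab
          have hna : a ≠ i := fun hc => ((pvD_mem t (i :: seen) a).mp ha).2 (by simp [hc])
          have hnb : b ≠ i := fun hc => ((pvD_mem t (i :: seen) b).mp hb).2 (by simp [hc])
          simpa [List.idxOf_cons, Ne.symm hna, Ne.symm hnb] using Nat.succ_lt_succ hab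

-- count of the canonical regrouping
lemma pvCount_flatMap (s : List Char) : ∀ (u : List Char), u.Nodup → ∀ c,
    (u.flatMap (fun d => List.replicate (s.count d) d)).count c = if c ∈ u then s.count c else 0 := by
  intro u
  induction u with
  | nil => intro _ c; simp
  | cons d t ih =>
      intro hnd c
      rcases List.nodup_cons.mp hnd with ⟨hd, hnt⟩
      by_cases hc : c = d
      · subst hc
        simp [List.count_append, ih hnt, hd]
      · simp only [List.flatMap_cons, List.count_append, ih hnt, List.count_replicate,
          List.mem_cons]
        split_ifs with h1 h2 h3 <;> simp_all

-- uniqueness of a key-sorted list when equal keys force equal elements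
lemma pvSorted_unique (key : Char → Nat) : ∀ (xs ys : List Char), xs.Perm ys →
    xs.Pairwise (fun a b => key a ≤ key b) → ys.Pairwise (fun a b => key a ≤ key b) →
    (∀ a ∈ xs, ∀ b ∈ xs, key a = key b → a = b) → xs = ys := by
  intro xs
  induction xs with
  | nil => intro ys hp _ _ _; simpa using hp.symm.eq_nil
  | cons a xs ih =>
      intro ys hp hx hy htie
      cases ys with
      | nil => exact absurd hp.eq_nil (by simp)
      | cons b ys =>
        rcases List.pairwise_cons.mp hx with ⟨hax, hxt⟩
        rcases List.pairwise_cons.mp hy with ⟨hby, hyt⟩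
        have hbmem : b ∈ a :: xs := hp.mem_iff.mpr (by simp)
        have hamem : a ∈ b :: ys := hp.mem_iff.mp (by simp)
        have hab : key a ≤ key b := by
          rcases List.mem_cons.mp hbmem with rfl | hb
          · exact le_refl _
          · exact hax b hb
        have hba : key b ≤ key a := by
          rcases List.mem_cons.mp hamem with rfl | ha
          · exact le_refl _
          · exact hby a ha
        have heq : a = b := htie a (by simp) b hbmem (Nat.le_antisymm hab hba)
        subst heq
        have hperm : xs.Perm ys := hp.cons_inv
        rw [ih ys hperm hxt hyt (fun x hx y hy h => htie x (by simp [hx]) y (by simp [hy]) h)]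

-- equal keys force equal elements, for key c = s.index(c) on members of s
lemma pvKey_inj (s : List Char) : ∀ a ∈ s, ∀ b ∈ s,
    (PySem.List.index? s a).getD 0 = (PySem.List.index? s b).getD 0 → a = b := by
  intro a ha b hb h
  rcases Option.isSome_iff_exists.mp ((PySem.List.index?_isSome_iff s a).mpr ha) with ⟨ka, hka⟩
  rcases Option.isSome_iff_exists.mp ((PySem.List.index?_isSome_iff s b).mpr hb) with ⟨kb, hkb⟩
  rcases PySem.List.getElem_of_index?_eq_some hka with ⟨hla, hga, _⟩
  rcases PySem.List.getElem_of_index?_eq_some hkb with ⟨hlb, hgb, _⟩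
  rw [hka, hkb] at h
  simp only [Option.getD_some] at h
  subst h
  rw [← hga, ← hgb]

-- members of s have key = idxOf
lemma pvKey_eq_idxOf (s : List Char) (a : Char) (ha : a ∈ s) :
    (PySem.List.index? s a).getD 0 = s.idxOf a := by
  rw [PySem.List.index?_eq_idxOf?]
  have hs : (List.idxOf? a s).isSome := by
    rw [← PySem.List.index?_eq_idxOf?]; exact (PySem.List.index?_isSome_iff s a).mpr ha
  obtain ⟨k, hk⟩ := Option.isSome_iff_exists.mp hs
  rw [List.idxOf_eq_getD_idxOf?, hk]; rfl

-- flatMap of constant blocks over a strictly key-increasing list is key-nondecreasing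
lemma pvFlat_pairwise (key : Char → Nat) (m : Char → Nat) : ∀ u : List Char,
    u.Pairwise (fun a b => key a < key b) →
    (u.flatMap (fun d => List.replicate (m d) d)).Pairwise (fun a b => key a ≤ key b) := by
  intro u
  induction u with
  | nil => intro _; simp
  | cons d t ih =>
      intro hpw
      rcases List.pairwise_cons.mp hpw with ⟨hd, ht⟩
      simp only [List.flatMap_cons]
      refine List.pairwise_append.mpr ⟨?_, ih ht, ?_⟩
      · rw [List.pairwise_replicate]; exact Or.inr (le_refl _)
      · intro a ha b hb
        rcases List.mem_flatMap.mp hb with ⟨e, he, hbe⟩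
        rw [List.eq_of_mem_replicate ha, List.eq_of_mem_replicate hbe]
        exact le_of_lt (hd e he)

-- the canonical regrouping is key-nondecreasing
lemma pvCanon_pairwise (s : List Char) :
    ((pvD s []).flatMap (fun c => List.replicate (s.count c) c)).Pairwise
      (fun a b => (PySem.List.index? s a).getD 0 ≤ (PySem.List.index? s b).getD 0) := by
  have hpw : (pvD s []).Pairwise
      (fun a b => (PySem.List.index? s a).getD 0 < (PySem.List.index? s b).getD 0) := by
    refine (pvD_pairwise s []).imp_of_mem ?_
    intro a b ha hb hab
    have ha' : a ∈ s := ((pvD_mem s [] a).mp ha).1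
    have hb' : b ∈ s := ((pvD_mem s [] b).mp hb).1
    rw [pvKey_eq_idxOf s a ha', pvKey_eq_idxOf s b hb']
    exact hab
  exact pvFlat_pairwise _ (fun c => s.count c) (pvD s []) hpw

-- the canonical regrouping is a permutation of s
lemma pvCanon_perm (s : List Char) :
    ((pvD s []).flatMap (fun c => List.replicate (s.count c) c)).Perm s := by
  refine List.perm_iff_count.mpr ?_
  intro c
  rw [pvCount_flatMap s (pvD s []) (pvD_nodup s []) c]
  by_cases hc : c ∈ s
  · simp [(pvD_mem s [] c).mpr ⟨hc, by simp⟩]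
  · have : c ∉ pvD s [] := fun h => hc ((pvD_mem s [] c).mp h).1
    simp [this, List.count_eq_zero_of_not_mem hc]

-- CENTRAL LEMMA: A's per-string emit loop equals B's stable index-key sort
lemma pvCentral (s : List Char) :
    (s.foldl (pvStepA s) ([], [])).2 =
      PySem.List.sorted s (fun c => (PySem.List.index? s c).getD 0) := by
  rw [pvFold_eq_pvG s s []]
  rw [show pvG s s [] = ([] : List Char) ++ (pvD s []).flatMap (fun c => List.replicate (s.count c) c)
        from pvG_spec s s [] (fun c hc => hc)]
  rw [List.nil_append]
  refine (pvSorted_unique (fun c => (PySem.List.index? s c).getD 0)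
    (PySem.List.sorted s _ false) _ ?_ ?_ ?_ ?_).symm
  · exact (PySem.List.sorted_perm s _ false).trans (pvCanon_perm s).symm
  · exact PySem.List.sorted_pairwise s _
  · exact pvCanon_pairwise s
  · intro a ha b hb h
    have hm : ∀ x, x ∈ PySem.List.sorted s (fun c => (PySem.List.index? s c).getD 0) false → x ∈ s :=
      fun x hx => (PySem.List.sorted_perm s _ false).mem_iff.mp hx
    exact pvKey_inj s a (hm a ha) b (hm b hb) h

lemma pvLoop_spec : ∀ (l acc : List Int),
    pvAgruparLoop l acc = acc ++ agrupar_alt l := by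
  intro l
  induction l with
  | nil => intro acc; simp [pvAgruparLoop, agrupar_alt]
  | cons x rest ih =>
      intro acc
      simp only [pvAgruparLoop, agrupar_alt, List.map_cons]
      rw [ih, pvCentral (PySem.Int.toChars x)]
      simp [agrupar_alt]

-- ===== VERDICT (by name: the statement is the Claim_ definition above) =====
theorem agrupar_spec : Claim_equal_agrupar := by
  intro l _
  unfold Spec_agrupar agrupar
  simpa using pvLoop_spec l []
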